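-- pv_equiv track=rewrite | github.com/benz3927/job-hunting-agent | inbox_app.py | inbox_stats
-- ===== SOURCE A (Python) =====
-- def inbox_stats(jobs):
--     counts = {"new":0,"approved":0,"skipped":0,"pending":0,"strong":0,"maybe":0}
--     for j in jobs:
--         s = j.get("status","new")
--         counts[s] = counts.get(s,0) + 1
--         if s == "new":
--             t = j.get("triage","")
--             if t == "Strong": counts["strong"] += 1
--             elif t == "Maybe": counts["maybe"] += 1
--     return counts
-- ===== SOURCE B (Python) =====
-- def inbox_stats(jobs):
--     # pass 1: per distinct status (first-occurrence order), add its total into the base dict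
--     statuses = [j.get("status", "new") for j in jobs]
--     counts = {"new":0,"approved":0,"skipped":0,"pending":0,"strong":0,"maybe":0}
--     for s in dict.fromkeys(statuses):
--         counts[s] = counts.get(s, 0) + statuses.count(s)
--     # pass 2: triage categories of the still-new jobs
--     counts["strong"] += sum(1 for j in jobs
--                             if j.get("status","new") == "new" and j.get("triage","") == "Strong")
--     counts["maybe"] += sum(1 for j in jobs
--                            if j.get("status","new") == "new" and j.get("triage","") == "Maybe")
--     return counts
-- ===== Notes on version B (the rewrite author's own statement) =====
-- stated objective: alternative
-- what changed: Replaces A's single fused loop (incremental status counts with a nested triage branch) by separate passes: a merge of per-distinct-status totals (dict.fromkeys + list.count) into the fixed base dict, then two filtered sums over the new jobs for the strong/maybe triage categories.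
import Mathlib
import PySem

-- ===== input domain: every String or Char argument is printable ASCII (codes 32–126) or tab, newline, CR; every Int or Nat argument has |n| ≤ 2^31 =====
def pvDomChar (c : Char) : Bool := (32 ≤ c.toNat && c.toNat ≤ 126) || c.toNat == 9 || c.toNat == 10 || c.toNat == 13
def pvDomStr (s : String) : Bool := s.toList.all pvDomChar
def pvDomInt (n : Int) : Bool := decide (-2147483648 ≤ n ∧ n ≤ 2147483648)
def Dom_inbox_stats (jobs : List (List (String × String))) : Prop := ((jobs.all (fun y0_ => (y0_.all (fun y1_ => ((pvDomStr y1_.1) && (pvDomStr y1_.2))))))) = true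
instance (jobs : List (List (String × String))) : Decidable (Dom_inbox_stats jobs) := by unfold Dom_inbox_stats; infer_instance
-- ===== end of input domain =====

-- B replaces A's single fused loop by three separate passes (status tally merged into the
-- base dict, then two filtered counts for the triage categories); same cost, different shape.

-- shared helpers: a job dict lookup j.get(k, dflt) and the base counts literal
def pvJobGet (j : List (String × String)) (k dflt : String) : String :=
  (PySem.Dict.mk j).getD k dflt

def pvBase : PySem.Dict String Int :=
  PySem.Dict.ofList [("new",0),("approved",0),("skipped",0),("pending",0),("strong",0),("maybe",0)]

-- ===== PORT A =====
def inbox_stats (jobs : List (List (String × String))) : List (String × Int) :=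
  (jobs.foldl (fun counts j =>
      let s := pvJobGet j "status" "new"
      let counts := counts.insert s (counts.getD s 0 + 1)
      if s == "new" then
        let t := pvJobGet j "triage" ""
        if t == "Strong" then counts.insert "strong" (counts.getD "strong" 0 + 1)
        else if t == "Maybe" then counts.insert "maybe" (counts.getD "maybe" 0 + 1)
        else counts
      else counts)
    pvBase).items

-- ===== PORT B =====
def inbox_stats_alt (jobs : List (List (String × String))) : List (String × Int) :=
  let statuses := jobs.map (fun j => pvJobGet j "status" "new")
  let counts := (PySem.List.dedup statuses).foldl
      (fun c s => c.insert s (c.getD s 0 + (PySem.List.count statuses s : Int))) pvBase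
  let strongN : Int := ((jobs.filter (fun j =>
      pvJobGet j "status" "new" == "new" && pvJobGet j "triage" "" == "Strong")).length : Int)
  let counts := counts.insert "strong" (counts.getD "strong" 0 + strongN)
  let maybeN : Int := ((jobs.filter (fun j =>
      pvJobGet j "status" "new" == "new" && pvJobGet j "triage" "" == "Maybe")).length : Int)
  let counts := counts.insert "maybe" (counts.getD "maybe" 0 + maybeN)
  counts.items

-- ===== PRECONDITION & SPEC =====
def Spec_inbox_stats (jobs : List (List (String × String))) (out : List (String × Int)) : Prop := out = inbox_stats_alt jobs
instance (jobs : List (List (String × String))) (out : List (String × Int)) : Decidable (Spec_inbox_stats jobs out) := by unfold Spec_inbox_stats; infer_instance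

-- ===== CLAIM (what is proved, stated in full; the proofs are below) =====
def Claim_equal_inbox_stats : Prop := ∀ (jobs : List (List (String × String))), Dom_inbox_stats jobs → Spec_inbox_stats jobs (inbox_stats jobs)

-- ===== LEMMAS AND PROOFS =====

-- the additive counting step shared (up to defeq) by every loop in both ports
def pvStep (c : PySem.Dict String Int) (p : String × Int) : PySem.Dict String Int :=
  c.insert p.1 (c.getD p.1 0 + p.2)

def pvStatus (j : List (String × String)) : String := pvJobGet j "status" "new"

def pvIsStrong (j : List (String × String)) : Bool :=
  pvJobGet j "status" "new" == "new" && pvJobGet j "triage" "" == "Strong"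

def pvIsMaybe (j : List (String × String)) : Bool :=
  pvJobGet j "status" "new" == "new" && pvJobGet j "triage" "" == "Maybe"

-- A's loop body, verbatim
def pvStepA (counts : PySem.Dict String Int) (j : List (String × String)) : PySem.Dict String Int :=
  let s := pvJobGet j "status" "new"
  let counts := counts.insert s (counts.getD s 0 + 1)
  if s == "new" then
    let t := pvJobGet j "triage" ""
    if t == "Strong" then counts.insert "strong" (counts.getD "strong" 0 + 1)
    else if t == "Maybe" then counts.insert "maybe" (counts.getD "maybe" 0 + 1)
    else counts
  else counts

lemma contains_pvStep (c : PySem.Dict String Int) (p : String × Int) (k : String)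
    (h : c.contains k = true) : (pvStep c p).contains k = true := by
  simp [pvStep, PySem.Dict.contains_insert, h]

lemma contains_foldl_pvStep (l : List (String × Int)) (c : PySem.Dict String Int) (k : String)
    (h : c.contains k = true) : (l.foldl pvStep c).contains k = true := by
  induction l generalizing c with
  | nil => exact h
  | cons p rest ih => exact ih _ (contains_pvStep c p k h)

lemma insert_insert_comm_of_contains (d : PySem.Dict String Int) {k k' : String} (v v' : Int)
    (hne : k ≠ k') (hc : d.contains k = true ∨ d.contains k' = true) :
    (d.insert k v).insert k' v' = (d.insert k' v').insert k v := by
  have hne' : k' ≠ k := Ne.symm hne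
  apply PySem.Dict.ext
  by_cases h1 : d.contains k = true <;> by_cases h2 : d.contains k' = true
  · have c1 : (d.insert k v).contains k' = true := by
      simp [PySem.Dict.contains_insert, h2]
    have c2 : (d.insert k' v').contains k = true := by
      simp [PySem.Dict.contains_insert, h1]
    simp only [PySem.Dict.items_insert, c1, c2, h1, h2, if_true, List.map_map]
    apply List.map_congr_left
    intro p _
    simp only [Function.comp, beq_iff_eq]
    by_cases hp : p.1 = k <;> by_cases hp' : p.1 = k' <;>
      simp [hp, hp', hne, hne']
  · have c1 : (d.insert k v).contains k' = false := by
      simp [PySem.Dict.contains_insert, hne']; simpa using h2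
    have c2 : (d.insert k' v').contains k = true := by
      simp [PySem.Dict.contains_insert, h1]
    have h2' : d.contains k' = false := by simpa using h2
    simp only [PySem.Dict.items_insert, h2', c1, c2, h1, Bool.false_eq_true, if_true, if_false,
      List.map_append]
    simp [hne']
  · have c1 : (d.insert k v).contains k' = true := by
      simp [PySem.Dict.contains_insert, h2]
    have c2 : (d.insert k' v').contains k = false := by
      simp [PySem.Dict.contains_insert, hne]; simpa using h1
    have h1' : d.contains k = false := by simpa using h1
    simp only [PySem.Dict.items_insert, c1, c2, h1', h2, Bool.false_eq_true, if_true, if_false,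
      List.map_append]
    simp [hne]
  · rcases hc with h | h
    · exact absurd h h1
    · exact absurd h h2

lemma pvStep_pvStep_same (d : PySem.Dict String Int) (k : String) (a b : Int) :
    pvStep (pvStep d (k, a)) (k, b) = pvStep d (k, a + b) := by
  simp [pvStep, PySem.Dict.getD_insert_self, PySem.Dict.insert_insert_self, Int.add_assoc]

lemma pvStep_comm (d : PySem.Dict String Int) (k k' : String) (a b : Int)
    (hc : d.contains k = true ∨ d.contains k' = true) :
    pvStep (pvStep d (k, a)) (k', b) = pvStep (pvStep d (k', b)) (k, a) := by
  by_cases hk : k = k'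
  · subst hk
    rw [pvStep_pvStep_same, pvStep_pvStep_same, Int.add_comm]
  · simp only [pvStep, PySem.Dict.getD_insert, if_neg (fun h : k' = k => hk h.symm), if_neg hk]
    exact insert_insert_comm_of_contains d _ _ hk hc

-- push a bump at an already-present key through a whole counting fold
lemma foldl_pvStep_push (l : List (String × Int)) (d : PySem.Dict String Int) (k : String) (c : Int)
    (h : d.contains k = true) :
    l.foldl pvStep (pvStep d (k, c)) = pvStep (l.foldl pvStep d) (k, c) := by
  induction l generalizing d with
  | nil => rfl
  | cons p rest ih =>
      simp only [List.foldl_cons]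
      rw [pvStep_comm d k p.1 c p.2 (Or.inl h), ih _ (contains_pvStep d p k h)]

-- the pure status fold (both ports reduce to bumps around it)
def pvFoldPure (jobs : List (List (String × String))) (d : PySem.Dict String Int) : PySem.Dict String Int :=
  jobs.foldl (fun c j => pvStep c (pvStatus j, 1)) d

lemma foldPure_push (jobs : List (List (String × String))) (d : PySem.Dict String Int)
    (k : String) (c : Int) (h : d.contains k = true) :
    pvFoldPure jobs (pvStep d (k, c)) = pvStep (pvFoldPure jobs d) (k, c) := by
  have e : ∀ d' : PySem.Dict String Int, pvFoldPure jobs d'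
      = (jobs.map (fun j => (pvStatus j, (1:Int)))).foldl pvStep d' :=
    fun d' => (List.foldl_map ..).symm
  rw [e, e, foldl_pvStep_push _ _ _ _ h]

lemma contains_foldPure (jobs : List (List (String × String))) (d : PySem.Dict String Int)
    (k : String) (h : d.contains k = true) : (pvFoldPure jobs d).contains k = true := by
  have e : pvFoldPure jobs d = (jobs.map (fun j => (pvStatus j, (1:Int)))).foldl pvStep d :=
    (List.foldl_map ..).symm
  rw [e]; exact contains_foldl_pvStep _ _ _ h

lemma stepA_strong (d : PySem.Dict String Int) (j : List (String × String))
    (hs : (pvJobGet j "status" "new" == "new") = true)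
    (ht : (pvJobGet j "triage" "" == "Strong") = true) :
    pvStepA d j = pvStep (pvStep d (pvStatus j, 1)) ("strong", 1) := by
  simp only [pvStepA, hs, ht, if_true]
  rfl

lemma stepA_maybe (d : PySem.Dict String Int) (j : List (String × String))
    (hs : (pvJobGet j "status" "new" == "new") = true)
    (hts : (pvJobGet j "triage" "" == "Strong") = false)
    (htm : (pvJobGet j "triage" "" == "Maybe") = true) :
    pvStepA d j = pvStep (pvStep d (pvStatus j, 1)) ("maybe", 1) := by
  simp only [pvStepA, hs, hts, htm, if_true, Bool.false_eq_true, if_false]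
  rfl

lemma stepA_plain_new (d : PySem.Dict String Int) (j : List (String × String))
    (hs : (pvJobGet j "status" "new" == "new") = true)
    (hts : (pvJobGet j "triage" "" == "Strong") = false)
    (htm : (pvJobGet j "triage" "" == "Maybe") = false) :
    pvStepA d j = pvStep d (pvStatus j, 1) := by
  simp only [pvStepA, hs, hts, htm, if_true, Bool.false_eq_true, if_false]
  rfl

lemma stepA_other (d : PySem.Dict String Int) (j : List (String × String))
    (hs : (pvJobGet j "status" "new" == "new") = false) :
    pvStepA d j = pvStep d (pvStatus j, 1) := by
  simp only [pvStepA, hs, Bool.false_eq_true, if_false]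
  rfl

lemma nodup_keys_pvStep (c : PySem.Dict String Int) (p : String × Int)
    (h : c.keys.Nodup) : (pvStep c p).keys.Nodup := by
  have := PySem.Dict.nodup_keys_foldl_insert_key [p] Prod.fst
    (fun (c : PySem.Dict String Int) p => c.getD p.1 0 + p.2) c h
  simpa [pvStep] using this

-- a zero bump at an already-present key of a nodup-keyed dict is a no-op
lemma pvStep_zero (d : PySem.Dict String Int) (k : String)
    (hc : d.contains k = true) (hnd : d.keys.Nodup) : pvStep d (k, 0) = d := by
  apply PySem.Dict.ext
  rw [pvStep, PySem.Dict.items_insert_of_contains d _ hc]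
  conv_rhs => rw [← List.map_id d.items]
  apply List.map_congr_left
  intro p hp
  by_cases hpk : p.1 = k
  · have hpp : p = (k, p.2) := by cases p; simp_all
    have hv : d.getD k 0 = p.2 := PySem.Dict.getD_of_mem_items d (hpp ▸ hp) hnd 0
    rw [if_pos (by simp [hpk]), hv, Int.add_zero, id_eq, hpp]
  · rw [if_neg (by simp [hpk]), id_eq]

-- characterisation of A's fused loop: pure status fold, then the two triage bumps
lemma A_char (jobs : List (List (String × String))) (d : PySem.Dict String Int)
    (hnd : d.keys.Nodup)
    (hst : d.contains "strong" = true) (hmb : d.contains "maybe" = true) :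
    jobs.foldl pvStepA d
      = pvStep (pvStep (pvFoldPure jobs d)
          ("strong", ((jobs.filter pvIsStrong).length : Int)))
          ("maybe", ((jobs.filter pvIsMaybe).length : Int)) := by
  induction jobs generalizing d with
  | nil =>
      simp only [List.foldl_nil, List.filter_nil, List.length_nil, Nat.cast_zero]
      rw [show pvFoldPure [] d = d from rfl,
        pvStep_zero d "strong" hst hnd,
        pvStep_zero d "maybe" hmb hnd]
  | cons j rest ih =>
      have hfp : pvFoldPure (j :: rest) d = pvFoldPure rest (pvStep d (pvStatus j, 1)) := rfl
      have hnd' : (pvStep d (pvStatus j, 1)).keys.Nodup := nodup_keys_pvStep _ _ hnd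
      have hst' : (pvStep d (pvStatus j, 1)).contains "strong" = true := contains_pvStep _ _ _ hst
      have hmb' : (pvStep d (pvStatus j, 1)).contains "maybe" = true := contains_pvStep _ _ _ hmb
      have hcontS : (pvFoldPure rest (pvStep d (pvStatus j, 1))).contains "strong" = true :=
        contains_foldPure _ _ _ hst'
      have hcontM : (pvFoldPure rest (pvStep d (pvStatus j, 1))).contains "maybe" = true :=
        contains_foldPure _ _ _ hmb'
      rw [List.foldl_cons]
      by_cases hs : (pvJobGet j "status" "new" == "new") = true
      · by_cases ht : (pvJobGet j "triage" "" == "Strong") = true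
        · -- strong case
          rw [stepA_strong d j hs ht,
            ih _ (nodup_keys_pvStep _ _ hnd') (contains_pvStep _ _ _ hst') (contains_pvStep _ _ _ hmb'),
            foldPure_push _ _ _ _ hst', pvStep_pvStep_same, hfp]
          have hfs : (j :: rest).filter pvIsStrong = j :: rest.filter pvIsStrong := by
            simp [pvIsStrong, hs, ht]
          have hfm : (j :: rest).filter pvIsMaybe = rest.filter pvIsMaybe := by
            have : pvIsMaybe j = false := by
              simp only [pvIsMaybe, hs, Bool.true_and]
              have := (beq_iff_eq.mp ht)
              simp [this]
            simp [this]
          rw [hfs, hfm, List.length_cons]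
          have : (1 : Int) + ((rest.filter pvIsStrong).length : Int)
              = (((rest.filter pvIsStrong).length + 1 : Nat) : Int) := by push_cast; omega
          rw [this]
        · have ht' : (pvJobGet j "triage" "" == "Strong") = false := by
            simpa using ht
          by_cases htm : (pvJobGet j "triage" "" == "Maybe") = true
          · -- maybe case
            rw [stepA_maybe d j hs ht' htm,
              ih _ (nodup_keys_pvStep _ _ hnd') (contains_pvStep _ _ _ hst') (contains_pvStep _ _ _ hmb'),
              foldPure_push _ _ _ _ hmb',
              pvStep_comm _ "maybe" "strong" _ _ (Or.inl hcontM),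
              pvStep_pvStep_same, hfp]
            have hfs : (j :: rest).filter pvIsStrong = rest.filter pvIsStrong := by
              simp [pvIsStrong, ht']
            have hfm : (j :: rest).filter pvIsMaybe = j :: rest.filter pvIsMaybe := by
              simp [pvIsMaybe, hs, htm]
            rw [hfs, hfm, List.length_cons]
            have harith : (1 : Int) + ((rest.filter pvIsMaybe).length : Int)
                = (((rest.filter pvIsMaybe).length + 1 : Nat) : Int) := by push_cast; omega
            rw [harith]
          · -- new, no triage hit
            have htm' : (pvJobGet j "triage" "" == "Maybe") = false := by simpa using htm
            rw [stepA_plain_new d j hs ht' htm',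
              ih _ hnd' hst' hmb', hfp]
            have hfs : (j :: rest).filter pvIsStrong = rest.filter pvIsStrong := by
              simp [pvIsStrong, ht']
            have hfm : (j :: rest).filter pvIsMaybe = rest.filter pvIsMaybe := by
              simp [pvIsMaybe, htm']
            rw [hfs, hfm]
      · -- status not "new"
        have hs' : (pvJobGet j "status" "new" == "new") = false := by simpa using hs
        rw [stepA_other d j hs', ih _ hnd' hst' hmb', hfp]
        have hfs : (j :: rest).filter pvIsStrong = rest.filter pvIsStrong := by
          simp [pvIsStrong, hs']
        have hfm : (j :: rest).filter pvIsMaybe = rest.filter pvIsMaybe := by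
          simp [pvIsMaybe, hs']
        rw [hfs, hfm]

lemma map_bump_id (l : List (String × Int)) (k : String) (w : Int) (h : k ∉ l.map Prod.fst) :
    l.map (fun p => if p.1 == k then (k, w) else p) = l := by
  induction l with
  | nil => rfl
  | cons p rest ih =>
      simp only [List.map_cons, List.mem_cons, not_or] at h
      rw [List.map_cons, if_neg (by simp only [beq_iff_eq]; exact fun hq => h.1 hq.symm), ih h.2]

-- one counting insert on a nodup-keyed dict, replayed through a merge fold, is one bump
lemma merge_insert_one (t : PySem.Dict String Int) (k : String) (d : PySem.Dict String Int)
    (hnd : t.keys.Nodup) :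
    ((t.insert k (t.getD k 0 + 1)).items).foldl pvStep d
      = pvStep (t.items.foldl pvStep d) (k, 1) := by
  by_cases hk : t.contains k = true
  · have hkm : k ∈ t.items.map Prod.fst := by
      have := (PySem.Dict.contains_iff_mem_keys t k).mp hk
      simpa [PySem.Dict.keys] using this
    obtain ⟨p, hp, hpk⟩ := List.mem_map.mp hkm
    obtain ⟨l1, l2, hsplit⟩ := List.append_of_mem hp
    have hndm : ((l1.map Prod.fst) ++ p.1 :: (l2.map Prod.fst)).Nodup := by
      have h0 : (t.items.map Prod.fst).Nodup := by simpa [PySem.Dict.keys] using hnd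
      rw [hsplit] at h0
      simpa [List.map_append] using h0
    rw [List.nodup_append] at hndm
    have hk1 : k ∉ l1.map Prod.fst := by
      intro hx
      exact hndm.2.2 _ hx p.1 List.mem_cons_self hpk.symm
    have hk2 : k ∉ l2.map Prod.fst := by
      intro hx
      exact (List.nodup_cons.mp hndm.2.1).1 (hpk ▸ hx)
    have hpp : p = (k, p.2) := by cases p; simp_all
    have hgd : t.getD k 0 = p.2 := by
      have hmem : (k, p.2) ∈ t.items := by rw [← hpp]; exact hp
      exact PySem.Dict.getD_of_mem_items t hmem hnd 0
    have hitems : (t.insert k (t.getD k 0 + 1)).items = l1 ++ (k, p.2 + 1) :: l2 := by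
      rw [PySem.Dict.items_insert_of_contains t _ hk, hsplit, List.map_append, List.map_cons,
        map_bump_id _ _ _ hk1, map_bump_id _ _ _ hk2, hgd]
      congr 2
      simp [hpk]
    rw [hitems, hsplit, List.foldl_append, List.foldl_append, List.foldl_cons, List.foldl_cons,
      hpp]
    rw [show pvStep (l1.foldl pvStep d) (k, p.2 + 1)
          = pvStep (pvStep (l1.foldl pvStep d) (k, p.2)) (k, 1) from (pvStep_pvStep_same _ _ _ _).symm]
    exact foldl_pvStep_push _ _ _ _ (by simp [pvStep])
  · have hkf : t.contains k = false := by simpa using hk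
    rw [PySem.Dict.items_insert_of_not_contains t _ hkf, List.foldl_append, List.foldl_cons,
      List.foldl_nil, PySem.Dict.getD_of_not_contains t 0 hkf]
    norm_num

-- replaying a counting dict's items through a merge fold equals the one-at-a-time fold
lemma tally_merge_aux (jobs : List (List (String × String))) (d : PySem.Dict String Int) :
    (jobs.foldl (fun t j => pvStep t (pvStatus j, 1)) PySem.Dict.empty).items.foldl pvStep d
      = pvFoldPure jobs d := by
  induction jobs using List.reverseRecOn with
  | nil => rfl
  | append_singleton xs x ih =>
      have hnd : (xs.foldl (fun t j => pvStep t (pvStatus j, 1)) PySem.Dict.empty).keys.Nodup :=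
        PySem.Dict.nodup_keys_foldl_insert_key xs pvStatus
          (fun t j => t.getD (pvStatus j) 0 + 1) PySem.Dict.empty PySem.Dict.nodup_keys_empty
      rw [List.foldl_append, List.foldl_cons, List.foldl_nil]
      rw [show pvStep (xs.foldl (fun t j => pvStep t (pvStatus j, 1)) PySem.Dict.empty) (pvStatus x, 1)
            = (xs.foldl (fun t j => pvStep t (pvStatus j, 1)) PySem.Dict.empty).insert (pvStatus x)
              ((xs.foldl (fun t j => pvStep t (pvStatus j, 1)) PySem.Dict.empty).getD (pvStatus x) 0 + 1)
            from rfl,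
        merge_insert_one _ _ _ hnd, ih]
      show pvStep (pvFoldPure xs d) (pvStatus x, 1) = pvFoldPure (xs ++ [x]) d
      simp [pvFoldPure, List.foldl_append]

-- B's per-distinct-status merge pass equals the pure status fold
lemma tally_merge (jobs : List (List (String × String))) (d : PySem.Dict String Int) :
    (PySem.List.dedup (jobs.map (fun j => pvJobGet j "status" "new"))).foldl
      (fun c s => c.insert s (c.getD s 0
        + (PySem.List.count (jobs.map (fun j => pvJobGet j "status" "new")) s : Int))) d
      = pvFoldPure jobs d := by
  have hmap : jobs.map (fun j => pvJobGet j "status" "new") = jobs.map pvStatus := rfl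
  rw [hmap, PySem.List.dedup_eq_ofList,
    show (fun (c : PySem.Dict String Int) (s : String) => c.insert s (c.getD s 0
        + (PySem.List.count (jobs.map pvStatus) s : Int)))
      = fun c s => pvStep c ((fun k => (k, (List.count k (jobs.map pvStatus) : Int))) s) from by
        funext c s
        simp [pvStep, PySem.List.count],
    ← List.foldl_map, ← PySem.Dict.items_counter,
    ← PySem.Dict.foldl_insert_getD_add_one_eq_counter]
  have hfold : (jobs.map pvStatus).foldl
        (fun (d : PySem.Dict String Int) (x : String) => d.insert x (d.getD x 0 + 1))
        PySem.Dict.empty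
      = jobs.foldl (fun t j => pvStep t (pvStatus j, 1)) PySem.Dict.empty := List.foldl_map ..
  rw [hfold]
  exact tally_merge_aux jobs d


-- ===== VERDICT (by name: the statement is the Claim_ definition above) =====
theorem inbox_stats_spec : Claim_equal_inbox_stats := by
  intro jobs _
  show inbox_stats jobs = inbox_stats_alt jobs
  show (jobs.foldl pvStepA pvBase).items = inbox_stats_alt jobs
  rw [A_char jobs pvBase (by decide) (by decide) (by decide), ← tally_merge jobs pvBase]
  rfl
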